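-- pv_equiv track=rewrite | github.com/karenhaag/textmining2017 | clustering/feature_selection.py | dic_pos
-- ===== SOURCE A (Python) =====
-- def before_w(sent, i):
--     if i!= 0:
--         return sent[i-1][0]
--     else:
--         return "[start]"
--
-- def after_w(sent, i):
--     if i < len(sent)-1:
--         return sent[i+1][0]
--     else:
--         return "[end]"
--
-- def before_P(sent,i):
--     if i!= 0:
--         return sent[i-1][2]
--     else:
--         return "[start]"
--
-- def after_P(sent, i):
--     if i < len(sent)-1:
--         return sent[i+1][2]
--     else:
--         return "[end]"
--
-- def before_s(sent,i):
--     if i!= 0: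
--         return sent[i-1][3]
--     else:
--         return "[start]"
--
-- def after_s(sent, i):
--     if i < len(sent)-1:
--         return sent[i+1][3]
--     else:
--         return "[end]"
--
-- def dic_pos(sentences):
--     wordsDic = {}
--     index_words = []
--     list_context = []
--     list_class = []
--     count = 0
--     for sent in sentences:
--             for i,w in enumerate(sent):
--                 word = w[0]
--                 lemma_word = w[1]
--                 POS_word = w[2]
--                 synset_word = w[3]
--
--                 before_word = before_w(sent,i)
--                 before_POS = before_P(sent,i)
--                 before_synset = before_s(sent,i)
--                 after_word = after_w(sent,i)
--                 after_POS = after_P(sent,i)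
--                 after_synset = after_s(sent,i)
--
--                 if wordsDic.get(word, None) == None:
--                     lenDic = len(wordsDic)
--                     wordsDic[word] = lenDic
--                     index_words.append(word)
--                     list_context.append({"lemma_word="+ lemma_word:1 , "synset_word="+synset_word:1,
--                                         "before_word="+before_word:1, "before_POS="+before_POS:1,
--                                         "before_synset="+before_synset:1,"after_word="+after_word:1,
--                                         "after_POS="+after_POS:1, "after_synset="+after_synset:1 })
--                     list_class.append(POS_word)
--                 else:
--                     index = wordsDic[word]
--                     list_context_aux = ["lemma_word="+ lemma_word,"synset_word="+synset_word, "before_word="+before_word,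
--                                "before_POS="+before_POS, "before_synset="+before_synset, "after_word="+after_word,
--                                "after_POS="+after_POS, "after_synset="+after_synset]
--                     for context in list_context_aux:
--                         if list_context[index].get(context,None) == None:
--                             list_context[index][context] = 1
--                         else:
--                             list_context[index][context] += 1
--     return(wordsDic, index_words, list_context,list_class)
-- ===== SOURCE B (Python) =====
-- def dic_pos(sentences):
--     # pass 1: flatten the corpus into an event stream (word, POS, eight context-key strings)
--     events = []
--     for sent in sentences:
--         n = len(sent)
--         for i, w in enumerate(sent):
--             b = sent[i - 1] if i != 0 else None
--             a = sent[i + 1] if i < n - 1 else None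
--             events.append((w[0], w[2], [
--                 "lemma_word=" + w[1],
--                 "synset_word=" + w[3],
--                 "before_word=" + (b[0] if b is not None else "[start]"),
--                 "before_POS=" + (b[2] if b is not None else "[start]"),
--                 "before_synset=" + (b[3] if b is not None else "[start]"),
--                 "after_word=" + (a[0] if a is not None else "[end]"),
--                 "after_POS=" + (a[2] if a is not None else "[end]"),
--                 "after_synset=" + (a[3] if a is not None else "[end]"),
--             ]))
--     # pass 2: group the key stream by word (first-sight order, class at first sight)
--     keyseq = {}
--     order = []
--     classes = []
--     for word, pos, keys in events:
--         if word not in keyseq: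
--             keyseq[word] = []
--             order.append(word)
--             classes.append(pos)
--         keyseq[word].extend(keys)
--     # pass 3: per word, count key occurrences; dict keys in first-occurrence order
--     list_context = [{k: keyseq[w].count(k) for k in dict.fromkeys(keyseq[w])}
--                     for w in order]
--     return ({w: i for i, w in enumerate(order)}, order, list_context, classes)
-- ===== Notes on version B (the rewrite author's own statement) =====
-- stated objective: alternative
-- what changed: B replaces A's single-pass incremental counting (word-to-index dict with a two-branch per-key increment into index-linked parallel lists) by three staged passes: flatten the corpus into a (word, POS, eight-context-keys) event stream, group the key stream per word in first-sight order, then build each context dict non-incrementally as {k: seq.count(k) for k in dict.fromkeys(seq)}.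
import Mathlib
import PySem

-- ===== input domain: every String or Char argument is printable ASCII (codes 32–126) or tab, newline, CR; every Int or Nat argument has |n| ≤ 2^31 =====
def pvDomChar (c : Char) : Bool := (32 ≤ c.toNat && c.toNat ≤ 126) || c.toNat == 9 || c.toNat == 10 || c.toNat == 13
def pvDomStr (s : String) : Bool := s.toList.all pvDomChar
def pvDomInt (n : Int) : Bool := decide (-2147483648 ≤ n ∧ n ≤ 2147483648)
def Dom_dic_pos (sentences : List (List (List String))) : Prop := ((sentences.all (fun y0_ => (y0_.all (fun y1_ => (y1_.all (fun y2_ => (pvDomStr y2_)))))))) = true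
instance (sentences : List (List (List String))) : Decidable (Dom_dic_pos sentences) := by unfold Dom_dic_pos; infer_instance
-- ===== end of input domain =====

-- B restages A's single incremental pass as three passes: flatten to a (word, POS, keys) event stream, group the
-- key stream per word in first-sight order, then count each word's keys non-incrementally (dedup + count).
-- Objective: alternative, same behaviour. Python A mutates only its own locals, so return-value equivalence is the whole story.

-- ===== PORT A =====
-- token/element reads use pyGet? with a default; Pre_dic_pos rules out the inputs where Python would raise IndexError
def before_w (sent : List (List String)) (i : Int) : String :=
  if i ≠ 0 then (PySem.List.pyGet? ((PySem.List.pyGet? sent (i - 1)).getD []) 0).getD "" else "[start]"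

def after_w (sent : List (List String)) (i : Int) : String :=
  if i < (sent.length : Int) - 1 then (PySem.List.pyGet? ((PySem.List.pyGet? sent (i + 1)).getD []) 0).getD "" else "[end]"

def before_P (sent : List (List String)) (i : Int) : String :=
  if i ≠ 0 then (PySem.List.pyGet? ((PySem.List.pyGet? sent (i - 1)).getD []) 2).getD "" else "[start]"

def after_P (sent : List (List String)) (i : Int) : String :=
  if i < (sent.length : Int) - 1 then (PySem.List.pyGet? ((PySem.List.pyGet? sent (i + 1)).getD []) 2).getD "" else "[end]"

def before_s (sent : List (List String)) (i : Int) : String :=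
  if i ≠ 0 then (PySem.List.pyGet? ((PySem.List.pyGet? sent (i - 1)).getD []) 3).getD "" else "[start]"

def after_s (sent : List (List String)) (i : Int) : String :=
  if i < (sent.length : Int) - 1 then (PySem.List.pyGet? ((PySem.List.pyGet? sent (i + 1)).getD []) 3).getD "" else "[end]"

-- A's loop body for one (i, w) of enumerate(sent); Python's in-place `list_context[index][context] = …`
-- mutation is ported as a fold on the element followed by List.set at the same index
def pvStepA (sent : List (List String))
    (st : PySem.Dict String Int × List String × List (PySem.Dict String Int) × List String)
    (iw : Int × List String) :
    PySem.Dict String Int × List String × List (PySem.Dict String Int) × List String :=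
  let i := iw.1
  let w := iw.2
  let word := (PySem.List.pyGet? w 0).getD ""
  let lemma_word := (PySem.List.pyGet? w 1).getD ""
  let POS_word := (PySem.List.pyGet? w 2).getD ""
  let synset_word := (PySem.List.pyGet? w 3).getD ""
  let before_word := before_w sent i
  let before_POS := before_P sent i
  let before_synset := before_s sent i
  let after_word := after_w sent i
  let after_POS := after_P sent i
  let after_synset := after_s sent i
  match st with
  | (wordsDic, index_words, list_context, list_class) =>
    if wordsDic.get? word = none then        -- wordsDic.get(word, None) == None
      let lenDic : Int := wordsDic.size
      (wordsDic.insert word lenDic, index_words ++ [word],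
       list_context ++ [(((((((((PySem.Dict.empty : PySem.Dict String Int).insert
            ("lemma_word=" ++ lemma_word) 1).insert
            ("synset_word=" ++ synset_word) 1).insert
            ("before_word=" ++ before_word) 1).insert
            ("before_POS=" ++ before_POS) 1).insert
            ("before_synset=" ++ before_synset) 1).insert
            ("after_word=" ++ after_word) 1).insert
            ("after_POS=" ++ after_POS) 1).insert
            ("after_synset=" ++ after_synset) 1)],
       list_class ++ [POS_word])
    else
      let index := (wordsDic.get? word).getD 0   -- wordsDic[word]; present in this branch
      let list_context_aux := ["lemma_word=" ++ lemma_word, "synset_word=" ++ synset_word,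
        "before_word=" ++ before_word, "before_POS=" ++ before_POS,
        "before_synset=" ++ before_synset, "after_word=" ++ after_word,
        "after_POS=" ++ after_POS, "after_synset=" ++ after_synset]
      let updated := list_context_aux.foldl
        (fun d context => if d.get? context = none then d.insert context 1
                          else d.insert context ((d.get? context).getD 0 + 1))
        ((PySem.List.pyGet? list_context index).getD PySem.Dict.empty)
      (wordsDic, index_words, list_context.set index.toNat updated, list_class)
      -- index is a wordsDic value, always 0 ≤ index < list_context.length, so .toNat is exact here

def dic_pos (sentences : List (List (List String))) : (List (String × Int)) × List String × (List (List (String × Int))) × List String :=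
  let st := sentences.foldl
    (fun st sent => (PySem.List.enumerate sent 0).foldl (pvStepA sent) st)
    ((PySem.Dict.empty : PySem.Dict String Int), ([] : List String),
     ([] : List (PySem.Dict String Int)), ([] : List String))
  match st with
  | (wordsDic, index_words, list_context, list_class) =>
    (wordsDic.items, index_words, list_context.map (·.items), list_class)

-- ===== PORT B =====
-- pass 1's per-token event: (word, POS, the eight context-key strings)
def pvEvent (sent : List (List String)) (n : Int) (iw : Int × List String) : String × String × List String :=
  let i := iw.1
  let w := iw.2
  let b : Option (List String) := if i ≠ 0 then some ((PySem.List.pyGet? sent (i - 1)).getD []) else none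
  let a : Option (List String) := if i < n - 1 then some ((PySem.List.pyGet? sent (i + 1)).getD []) else none
  ((PySem.List.pyGet? w 0).getD "", (PySem.List.pyGet? w 2).getD "",
   ["lemma_word=" ++ (PySem.List.pyGet? w 1).getD "",
    "synset_word=" ++ (PySem.List.pyGet? w 3).getD "",
    "before_word=" ++ (match b with | some p => (PySem.List.pyGet? p 0).getD "" | none => "[start]"),
    "before_POS=" ++ (match b with | some p => (PySem.List.pyGet? p 2).getD "" | none => "[start]"),
    "before_synset=" ++ (match b with | some p => (PySem.List.pyGet? p 3).getD "" | none => "[start]"),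
    "after_word=" ++ (match a with | some p => (PySem.List.pyGet? p 0).getD "" | none => "[end]"),
    "after_POS=" ++ (match a with | some p => (PySem.List.pyGet? p 2).getD "" | none => "[end]"),
    "after_synset=" ++ (match a with | some p => (PySem.List.pyGet? p 3).getD "" | none => "[end]")])

-- pass 2's body: group the keys under their word (first sight records order and class)
def pvStepB (st : PySem.Dict String (List String) × List String × List String)
    (e : String × String × List String) :
    PySem.Dict String (List String) × List String × List String :=
  match e, st with
  | (word, pos, keys), (keyseq, order, classes) =>
    let st' := if keyseq.contains word then (keyseq, order, classes)
               else (keyseq.insert word ([] : List String), order ++ [word], classes ++ [pos])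
    match st' with
    | (keyseq, order, classes) =>
      (keyseq.insert word (keyseq.getD word [] ++ keys), order, classes)   -- keyseq[word].extend(keys)

def dic_pos_alt (sentences : List (List (List String))) : (List (String × Int)) × List String × (List (List (String × Int))) × List String :=
  let events := sentences.foldl
    (fun ev sent =>
      let n : Int := sent.length
      (PySem.List.enumerate sent 0).foldl (fun ev iw => ev ++ [pvEvent sent n iw]) ev)
    ([] : List (String × String × List String))
  let st := events.foldl pvStepB
    ((PySem.Dict.empty : PySem.Dict String (List String)), ([] : List String), ([] : List String))
  match st with
  | (keyseq, order, classes) =>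
    let wordsDic := (PySem.List.enumerate order 0).foldl
      (fun d p => d.insert p.2 p.1) (PySem.Dict.empty : PySem.Dict String Int)
    (wordsDic.items, order,
     -- {k: seq.count(k) for k in dict.fromkeys(seq)}
     order.map (fun w =>
       (PySem.List.dedup (keyseq.getD w [])).map (fun k => (k, ((keyseq.getD w []).count k : Int)))),
     classes)

-- ===== PRECONDITION & SPEC =====
-- Pre_ excludes exactly the inputs where Python A raises IndexError (a token with fewer than four fields
-- is subscripted w[0]..w[3]); B raises IndexError on the same inputs.
def Pre_dic_pos (sentences : List (List (List String))) : Prop :=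
  ∀ sent ∈ sentences, ∀ w ∈ sent, 4 ≤ w.length
instance (sentences : List (List (List String))) : Decidable (Pre_dic_pos sentences) := by unfold Pre_dic_pos; infer_instance

def pvWitness_dic_pos : List (List (List String)) :=
  [[["the", "the", "DT", "s1"], ["cat", "cat", "NN", "s2"]], [["cat", "cat", "NN", "s3"]]]

def Spec_dic_pos (sentences : List (List (List String))) (out : (List (String × Int)) × List String × (List (List (String × Int))) × List String) : Prop := out = dic_pos_alt sentences
instance (sentences : List (List (List String))) (out : (List (String × Int)) × List String × (List (List (String × Int))) × List String) : Decidable (Spec_dic_pos sentences out) := by unfold Spec_dic_pos; infer_instance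

-- ===== CLAIM (what is proved, stated in full; the proofs are below) =====
def Claim_equal_dic_pos : Prop := ∀ (sentences : List (List (List String))), Dom_dic_pos sentences → Pre_dic_pos sentences → Spec_dic_pos sentences (dic_pos sentences)

-- ===== LEMMAS AND PROOFS =====

-- the word → first-sight-index dictionary that A maintains, expressed from B's order list
def pvEnumDict (ord : List String) : PySem.Dict String Int :=
  PySem.Dict.mk ((PySem.List.enumerate ord 0).map (fun p => (p.2, p.1)))

-- A's four accumulators reconstructed from B's pass-2 state (keyseq, order, classes)
def pvAbs (b : PySem.Dict String (List String) × List String × List String) :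
    PySem.Dict String Int × List String × List (PySem.Dict String Int) × List String :=
  (pvEnumDict b.2.1, b.2.1,
   b.2.1.map (fun w => PySem.Dict.counter (b.1.getD w [])),
   b.2.2)

def pvInv (b : PySem.Dict String (List String) × List String × List String) : Prop :=
  b.2.1.Nodup ∧ ∀ x, b.1.contains x = decide (x ∈ b.2.1)

lemma pvKeyNe (p q a b : String) (hp : ¬ (p.toList <+: q.toList)) (hq : ¬ (q.toList <+: p.toList)) :
    p ++ a ≠ q ++ b := by
  intro h
  have h2 : p.toList ++ a.toList = q.toList ++ b.toList := by
    simpa using congrArg String.toList h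
  rcases List.append_eq_append_iff.mp h2 with ⟨c, hc, _⟩ | ⟨c, hc, _⟩
  · exact hp ⟨c, hc.symm⟩
  · exact hq ⟨c, hc.symm⟩

lemma pvKeysPairwise (a b c d e f g h : String) :
    List.Pairwise (fun x y => x ≠ y)
      ["lemma_word=" ++ a, "synset_word=" ++ b, "before_word=" ++ c, "before_POS=" ++ d,
       "before_synset=" ++ e, "after_word=" ++ f, "after_POS=" ++ g, "after_synset=" ++ h] := by
  rw [List.pairwise_iff_getElem]
  intro i j hi hj hij
  simp only [List.length_cons, List.length_nil] at hi hj
  interval_cases i <;> interval_cases j <;>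
    first
      | omega
      | (simp only [List.getElem_cons_zero, List.getElem_cons_succ]
         apply pvKeyNe <;> decide)

-- key lookup facts for pvEnumDict
lemma pvEnumDict_keys (ord : List String) : (pvEnumDict ord).keys = ord := by
  simp only [pvEnumDict, PySem.Dict.keys_mk, List.map_map]
  exact PySem.List.map_snd_enumerate ord 0

lemma pvEnumDict_get?_none_iff (ord : List String) (x : String) :
    (pvEnumDict ord).get? x = none ↔ x ∉ ord := by
  rw [PySem.Dict.get?_eq_none_iff_not_mem_keys, pvEnumDict_keys]

lemma pvEnumDict_size (ord : List String) : ((pvEnumDict ord).size : Int) = (ord.length : Int) := by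
  simp [pvEnumDict, PySem.Dict.size, PySem.List.length_enumerate]

lemma pvEnumDict_snoc (ord : List String) (x : String) (hx : x ∉ ord) :
    (pvEnumDict ord).insert x (ord.length : Int) = pvEnumDict (ord ++ [x]) := by
  apply PySem.Dict.ext
  have hc : (pvEnumDict ord).contains x = false := by
    rw [PySem.Dict.contains_eq_decide_mem_keys, pvEnumDict_keys]
    simp [hx]
  rw [PySem.Dict.items_insert_of_not_contains _ _ hc]
  simp [pvEnumDict, PySem.List.enumerate_append, PySem.List.enumerate_cons, PySem.List.enumerate_nil]

lemma pvEnumDict_get?_mem (ord : List String) (x : String) (hx : x ∈ ord) (hnd : ord.Nodup) :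
    (pvEnumDict ord).get? x = some ((ord.idxOf x : Nat) : Int) := by
  have hlt := List.idxOf_lt_length_of_mem hx
  refine PySem.Dict.get?_of_mem_items _ ?_ (by rw [pvEnumDict_keys]; exact hnd)
  simp only [pvEnumDict]
  refine List.mem_map.mpr ⟨(((ord.idxOf x : Nat) : Int), x), ?_, rfl⟩
  exact (PySem.List.mem_enumerate_iff _ _ _).mpr ⟨ord.idxOf x, hlt, by simp [List.getElem_idxOf hlt]⟩

-- A's two-branch per-key update is the unified get-and-increment
lemma pvFoldA_eq_incr (ks : List String) (d : PySem.Dict String Int) :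
    ks.foldl (fun d context => if d.get? context = none then d.insert context 1
                               else d.insert context ((d.get? context).getD 0 + 1)) d
      = ks.foldl (fun d k => d.insert k (d.getD k 0 + 1)) d := by
  apply PySem.List.foldl_congr_mem
  intro d c _
  by_cases h : d.get? c = none
  · simp [h, PySem.Dict.getD_eq_get?_getD]
  · simp [h, PySem.Dict.getD_eq_get?_getD]

-- incrementing a counter with more keys counts the concatenation
lemma pvIncr_counter (seq ks : List String) :
    ks.foldl (fun d k => d.insert k (d.getD k 0 + 1)) (PySem.Dict.counter seq)
      = PySem.Dict.counter (seq ++ ks) := by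
  rw [← PySem.Dict.foldl_insert_getD_add_one_eq_counter seq,
      ← PySem.Dict.foldl_insert_getD_add_one_eq_counter (seq ++ ks), List.foldl_append]

-- incrementing pairwise-distinct fresh keys just writes 1s
lemma pvFoldIncr_fresh (ks : List String) (d : PySem.Dict String Int)
    (hp : ks.Pairwise (fun x y => x ≠ y)) (hd : ∀ x ∈ ks, d.contains x = false) :
    ks.foldl (fun d k => d.insert k (d.getD k 0 + 1)) d
      = ks.foldl (fun d k => d.insert k 1) d := by
  induction ks generalizing d with
  | nil => rfl
  | cons k t ih =>
    rcases List.pairwise_cons.mp hp with ⟨hk, ht⟩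
    have h0 : d.getD k 0 = 0 := PySem.Dict.getD_of_not_contains _ _ (hd k (by simp))
    simp only [List.foldl_cons, h0, zero_add]
    exact ih (d.insert k 1) ht (by
      intro x hx
      rw [PySem.Dict.contains_insert]
      have : x ≠ k := (hk x hx).symm
      simp [this, hd x (by simp [hx])])

-- updating the slot of `x` in a map over a Nodup list
lemma pvMapSet {β : Type} (ord : List String) (f g : String → β) (x : String) (v : β)
    (hx : x ∈ ord) (hnd : ord.Nodup)
    (hg : ∀ y ∈ ord, y ≠ x → g y = f y) (hv : g x = v) :
    (ord.map f).set (ord.idxOf x) v = ord.map g := by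
  have hlt := List.idxOf_lt_length_of_mem hx
  apply List.ext_getElem
  · simp
  · intro j hj hj'
    simp only [List.length_map] at hj'
    rw [List.getElem_set]
    by_cases h : ord.idxOf x = j
    · subst h
      rw [if_pos rfl, List.getElem_map, List.getElem_idxOf hlt]
      exact hv.symm
    · rw [if_neg h, List.getElem_map, List.getElem_map]
      refine (hg _ (List.getElem_mem hj') ?_).symm
      intro hEq
      exact h ((List.Nodup.getElem_inj_iff hnd).mp
        (by rw [List.getElem_idxOf hlt, hEq]))

-- B's prev/next option-match is A's helpers' if-expression
lemma pvMatchPrev (sent : List (List String)) (i j : Int) :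
    (match (if i ≠ 0 then some ((PySem.List.pyGet? sent (i - 1)).getD []) else none) with
     | some p => (PySem.List.pyGet? p j).getD "" | none => "[start]")
    = if i ≠ 0 then (PySem.List.pyGet? ((PySem.List.pyGet? sent (i - 1)).getD []) j).getD "" else "[start]" := by
  by_cases hi : i ≠ 0 <;> simp [hi]

lemma pvMatchNext (sent : List (List String)) (n i j : Int) :
    (match (if i < n - 1 then some ((PySem.List.pyGet? sent (i + 1)).getD []) else none) with
     | some p => (PySem.List.pyGet? p j).getD "" | none => "[end]")
    = if i < n - 1 then (PySem.List.pyGet? ((PySem.List.pyGet? sent (i + 1)).getD []) j).getD "" else "[end]" := by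
  by_cases hi : i < n - 1 <;> simp [hi]

-- one token: A's step on the abstraction is the abstraction of B's pass-2 step on the token's event
set_option maxHeartbeats 1000000 in
lemma pvStep_comm (sent : List (List String)) (iw : Int × List String)
    (b : PySem.Dict String (List String) × List String × List String)
    (hb : pvInv b) :
    pvStepA sent (pvAbs b) iw = pvAbs (pvStepB b (pvEvent sent (sent.length : Int) iw)) ∧
      pvInv (pvStepB b (pvEvent sent (sent.length : Int) iw)) := by
  obtain ⟨i, w⟩ := iw
  obtain ⟨ks, ord, cls⟩ := b
  obtain ⟨hnd, hcont⟩ := hb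
  simp only [pvInv] at hcont ⊢
  simp only [pvStepA, pvStepB, pvAbs, pvEvent, pvMatchPrev, pvMatchNext,
    before_w, before_P, before_s, after_w, after_P, after_s]
  set word := (PySem.List.pyGet? w 0).getD "" with hword
  set s1 := (PySem.List.pyGet? w 1).getD "" with hs1
  set s3 := (PySem.List.pyGet? w 3).getD "" with hs3
  set bw := if i ≠ 0 then (PySem.List.pyGet? ((PySem.List.pyGet? sent (i - 1)).getD []) 0).getD "" else "[start]" with hbw
  set bp := if i ≠ 0 then (PySem.List.pyGet? ((PySem.List.pyGet? sent (i - 1)).getD []) 2).getD "" else "[start]" with hbp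
  set bs := if i ≠ 0 then (PySem.List.pyGet? ((PySem.List.pyGet? sent (i - 1)).getD []) 3).getD "" else "[start]" with hbs
  set aw := if i < (sent.length : Int) - 1 then (PySem.List.pyGet? ((PySem.List.pyGet? sent (i + 1)).getD []) 0).getD "" else "[end]" with haw
  set ap := if i < (sent.length : Int) - 1 then (PySem.List.pyGet? ((PySem.List.pyGet? sent (i + 1)).getD []) 2).getD "" else "[end]" with hap
  set as' := if i < (sent.length : Int) - 1 then (PySem.List.pyGet? ((PySem.List.pyGet? sent (i + 1)).getD []) 3).getD "" else "[end]" with has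
  set keys : List String := ["lemma_word=" ++ s1, "synset_word=" ++ s3, "before_word=" ++ bw,
    "before_POS=" ++ bp, "before_synset=" ++ bs, "after_word=" ++ aw,
    "after_POS=" ++ ap, "after_synset=" ++ as'] with hkeys
  by_cases hmem : word ∈ ord
  · have hA := pvEnumDict_get?_mem ord word hmem hnd
    have hBc : ks.contains word = true := by rw [hcont]; simp [hmem]
    rw [if_neg (by simp [hA]), if_pos hBc]
    have hlt := List.idxOf_lt_length_of_mem hmem
    set seq := ks.getD word [] with hseq
    constructor
    · rw [hA]
      simp only [Option.getD_some, Int.toNat_natCast]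
      have hstart : (PySem.List.pyGet?
          (List.map (fun w => PySem.Dict.counter (ks.getD w [])) ord) ((ord.idxOf word : Nat) : Int)).getD
            PySem.Dict.empty = PySem.Dict.counter seq := by
        rw [PySem.List.pyGet?_natCast]
        rw [List.getElem?_map]
        rw [List.getElem?_eq_getElem hlt]
        simp [List.getElem_idxOf hlt, hseq]
      rw [hstart, pvFoldA_eq_incr, pvIncr_counter]
      simp only [Prod.mk.injEq]
      refine ⟨trivial, trivial, ?_, trivial⟩
      refine pvMapSet ord _ _ word _ hmem hnd (fun y _ hy => ?_) ?_
      · simp only [PySem.Dict.getD_eq_get?_getD, PySem.Dict.get?_insert_of_ne _ _ hy]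
      · simp only [PySem.Dict.getD_eq_get?_getD, PySem.Dict.get?_insert_self]
        rfl
    · refine ⟨hnd, fun x => ?_⟩
      rw [PySem.Dict.contains_insert]
      by_cases hx : x = word
      · subst hx; simp [hmem]
      · simp [hx, hcont x]
  · have hA : (pvEnumDict ord).get? word = none := (pvEnumDict_get?_none_iff ord word).mpr hmem
    have hBc : ks.contains word = false := by rw [hcont]; simp [hmem]
    rw [if_pos hA, if_neg (by simp [hBc])]
    constructor
    · have hsz : ((pvEnumDict ord).size : Int) = (ord.length : Int) := pvEnumDict_size ord
      rw [hsz, pvEnumDict_snoc ord word hmem]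
      have hmid : ((ks.insert word ([] : List String)).getD word []) = ([] : List String) := by
        simp [PySem.Dict.getD_eq_get?_getD, PySem.Dict.get?_insert_self]
      rw [hmid, PySem.Dict.insert_insert_self]
      simp only [Prod.mk.injEq, List.nil_append]
      refine ⟨trivial, trivial, ?_, trivial⟩
      rw [List.map_append]
      congr 1
      · refine List.map_congr_left (fun y hy => ?_)
        simp only [PySem.Dict.getD_eq_get?_getD]
        rw [PySem.Dict.get?_insert_of_ne _ _ (by rintro rfl; exact hmem hy)]
      · have hwk : (ks.insert word keys).getD word [] = keys := by
          simp [PySem.Dict.getD_eq_get?_getD, PySem.Dict.get?_insert_self]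
        rw [List.map_cons, List.map_nil, hwk]
        have hcounter : PySem.Dict.counter keys = keys.foldl (fun d k => d.insert k 1) PySem.Dict.empty := by
          rw [← PySem.Dict.foldl_insert_getD_add_one_eq_counter keys]
          exact pvFoldIncr_fresh keys PySem.Dict.empty (pvKeysPairwise s1 s3 bw bp bs aw ap as')
            (fun x _ => PySem.Dict.contains_empty x)
        rw [hcounter]
        simp only [hkeys, List.foldl_cons, List.foldl_nil]
    · refine ⟨?_, fun x => ?_⟩
      · rw [List.nodup_append]
        refine ⟨hnd, List.nodup_singleton _, ?_⟩
        intro a ha b hb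
        rw [List.mem_singleton] at hb
        subst hb
        exact fun hEq => hmem (hEq ▸ ha)
      rw [PySem.Dict.contains_insert, PySem.Dict.contains_insert]
      by_cases hx : x = word
      · subst hx; simp
      · simp [hx, hcont x]

-- B's staged folds reshaped: folding pass 2 over the event list pass 1 builds IS a nested per-token fold
lemma pvShape (sentences : List (List (List String)))
    (ev0 : List (String × String × List String))
    (b0 : PySem.Dict String (List String) × List String × List String) :
    (sentences.foldl
        (fun ev sent =>
          (PySem.List.enumerate sent 0).foldl
            (fun ev iw => ev ++ [pvEvent sent (sent.length : Int) iw]) ev)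
        ev0).foldl pvStepB b0
      = sentences.foldl
          (fun b sent => (PySem.List.enumerate sent 0).foldl
            (fun b iw => pvStepB b (pvEvent sent (sent.length : Int) iw)) b)
          (ev0.foldl pvStepB b0) := by
  induction sentences generalizing ev0 with
  | nil => rfl
  | cons s t ih =>
    simp only [List.foldl_cons]
    rw [PySem.List.foldl_append_eq_flatMap, ih, List.foldl_append]
    congr 1
    have h : (PySem.List.enumerate s 0).flatMap (fun iw => [pvEvent s (s.length : Int) iw])
        = (PySem.List.enumerate s 0).map (pvEvent s (s.length : Int)) := by
      induction PySem.List.enumerate s 0 with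
      | nil => rfl
      | cons a t2 ih2 => simp [ih2]
    rw [h, List.foldl_map]

-- the per-token fold commutes with the abstraction (token loop, then sentence loop)
lemma pvInner_comm (sent : List (List String)) (l : List (Int × List String))
    (b : PySem.Dict String (List String) × List String × List String)
    (hb : pvInv b) :
    l.foldl (pvStepA sent) (pvAbs b)
      = pvAbs (l.foldl (fun b iw => pvStepB b (pvEvent sent (sent.length : Int) iw)) b) ∧
      pvInv (l.foldl (fun b iw => pvStepB b (pvEvent sent (sent.length : Int) iw)) b) := by
  induction l generalizing b with
  | nil => exact ⟨rfl, hb⟩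
  | cons x t ih =>
    obtain ⟨h1, h2⟩ := pvStep_comm sent x b hb
    simpa [h1] using ih _ h2

lemma pvOuter_comm (sentences : List (List (List String)))
    (b : PySem.Dict String (List String) × List String × List String)
    (hb : pvInv b) :
    sentences.foldl (fun st sent => (PySem.List.enumerate sent 0).foldl (pvStepA sent) st) (pvAbs b)
      = pvAbs (sentences.foldl
          (fun b sent => (PySem.List.enumerate sent 0).foldl
            (fun b iw => pvStepB b (pvEvent sent (sent.length : Int) iw)) b) b) ∧
      pvInv (sentences.foldl
          (fun b sent => (PySem.List.enumerate sent 0).foldl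
            (fun b iw => pvStepB b (pvEvent sent (sent.length : Int) iw)) b) b) := by
  induction sentences generalizing b with
  | nil => exact ⟨rfl, hb⟩
  | cons s t ih =>
    obtain ⟨h1, h2⟩ := pvInner_comm s (PySem.List.enumerate s 0) b hb
    simpa [h1] using ih _ h2

-- B's closing dict comprehension {w: i for i, w in enumerate(order)} has the items A accumulated
lemma pvWordsDic_items (ord : List String) (hnd : ord.Nodup) :
    ((PySem.List.enumerate ord 0).foldl (fun d p => d.insert p.2 p.1)
        (PySem.Dict.empty : PySem.Dict String Int)).items = (pvEnumDict ord).items := by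
  rw [PySem.Dict.items_foldl_insert_fresh (PySem.List.enumerate ord 0)
        (fun p => p.2) (fun p => p.1) PySem.Dict.empty
        (fun a _ => PySem.Dict.contains_empty _)
        (by simpa [PySem.List.map_snd_enumerate] using hnd)]
  simp [pvEnumDict, PySem.Dict.empty]

-- ===== VERDICT (by name: the statement is the Claim_ definition above) =====
theorem dic_pos_spec : Claim_equal_dic_pos := by
  intro sentences _ _
  simp only [Spec_dic_pos, dic_pos, dic_pos_alt]
  rw [pvShape]
  simp only [List.foldl_nil]
  have hinit : pvInv ((PySem.Dict.empty : PySem.Dict String (List String)),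
      ([] : List String), ([] : List String)) :=
    ⟨List.nodup_nil, fun x => by simp [PySem.Dict.contains_empty]⟩
  obtain ⟨h1, h2⟩ := pvOuter_comm sentences _ hinit
  have habs : ((PySem.Dict.empty : PySem.Dict String Int), ([] : List String),
      ([] : List (PySem.Dict String Int)), ([] : List String))
      = pvAbs ((PySem.Dict.empty : PySem.Dict String (List String)),
        ([] : List String), ([] : List String)) := rfl
  rcases hB : (sentences.foldl
      (fun b sent => (PySem.List.enumerate sent 0).foldl
        (fun b iw => pvStepB b (pvEvent sent (sent.length : Int) iw)) b)
      ((PySem.Dict.empty : PySem.Dict String (List String)),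
       ([] : List String), ([] : List String))) with ⟨ks, ord, cls⟩
  rw [hB] at h1 h2
  rw [habs, h1]
  obtain ⟨hnd, -⟩ := h2
  dsimp only [pvAbs]
  refine Prod.ext ?_ (Prod.ext rfl (Prod.ext ?_ rfl))
  · exact (pvWordsDic_items ord hnd).symm
  · simp [List.map_map, Function.comp, PySem.Dict.items_counter, PySem.List.dedup_eq_ofList]
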